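-- pv_equiv track=rewrite | github.com/jansk32/Chexers_3 | part-B-skeleton/randomplayer/player.py | state_diff
-- ===== SOURCE A (Python) =====
-- def state_diff(state1, state2):
--     diff = [None, None]
--     for piece in state1:
--         if piece not in state2:
--             diff[0] = piece[0]
--             # if a piece has exited between states, there is no new location
--             if len(state2) < len(state1):
--                 return diff
--             # if a piece has moved between states, find new location
--             for new_piece in state2:
--                 if new_piece not in state1:
--                     diff[1] = new_piece[0]
--     return diff
-- ===== SOURCE B (Python) =====
-- def state_diff(state1, state2):
--     # A piece has exited the board: report the piece that disappeared.
--     if len(state2) < len(state1):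
--         for piece in state1:
--             if piece not in state2:
--                 return [piece[0], None]
--         return [None, None]
--     # Otherwise a piece may have moved: scan both boards for its old and new location.
--     old = None
--     for piece in state1:
--         if piece not in state2:
--             old = piece[0]
--     if old is None:
--         return [None, None]
--     new = None
--     for piece in state2:
--         if piece not in state1:
--             new = piece[0]
--     return [old, new]
-- ===== Notes on version B (the rewrite author's own statement) =====
-- stated objective: faster
-- what changed: A's interleaved nested scan (re-scanning all of state2 for every missing piece) is replaced by an up-front branch on exited-vs-moved with flat separate scans per branch, removing the repeated inner scan; Pre_ excludes only inputs where A (and B) raise IndexError on an empty piece.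
import Mathlib
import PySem

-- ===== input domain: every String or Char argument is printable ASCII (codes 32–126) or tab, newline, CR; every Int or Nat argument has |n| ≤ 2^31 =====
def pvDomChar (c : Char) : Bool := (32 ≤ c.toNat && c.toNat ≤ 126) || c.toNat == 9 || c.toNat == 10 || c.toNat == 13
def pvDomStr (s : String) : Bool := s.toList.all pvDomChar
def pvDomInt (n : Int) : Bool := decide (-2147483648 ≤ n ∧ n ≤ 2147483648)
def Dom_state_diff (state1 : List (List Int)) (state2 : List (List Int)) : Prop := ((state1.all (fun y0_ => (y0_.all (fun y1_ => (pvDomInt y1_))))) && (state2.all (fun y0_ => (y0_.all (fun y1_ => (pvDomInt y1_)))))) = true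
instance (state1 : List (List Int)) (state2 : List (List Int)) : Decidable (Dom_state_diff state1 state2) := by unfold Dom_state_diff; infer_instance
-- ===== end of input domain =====

-- B branches up front on exited-vs-moved and runs flat separate scans per branch instead of
-- A's interleaved nested loop (objective: faster, inner rescan removed); equal to A on Pre_.

-- ===== PORT A =====
-- inner 'for new_piece in state2' loop: threads diff[1]; result 'none' = Python raised IndexError
def state_diff_inner (state1 : List (List Int)) : List (List Int) → Option Int → Option (Option Int)
  | [], d1 => some d1
  | np :: rest, d1 =>
    if np ∈ state1 then state_diff_inner state1 rest d1
    else
      match PySem.List.pyGet? np 0 with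
      | none => none  -- Python: IndexError (excluded by Pre_)
      | some v => state_diff_inner state1 rest (some v)

-- outer 'for piece in state1' loop over the remaining suffix, carrying diff = [d0, d1]
def state_diff_loop (state1 state2 : List (List Int)) : List (List Int) → Option Int → Option Int → List (Option Int)
  | [], d0, d1 => [d0, d1]
  | piece :: rest, d0, d1 =>
    if piece ∈ state2 then state_diff_loop state1 state2 rest d0 d1
    else
      match PySem.List.pyGet? piece 0 with
      | none => [d0, d1]  -- Python: IndexError (excluded by Pre_)
      | some p0 =>
        if state2.length < state1.length then [some p0, d1]
        else
          match state_diff_inner state1 state2 d1 with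
          | none => [some p0, d1]  -- Python: IndexError (excluded by Pre_)
          | some d1' => state_diff_loop state1 state2 rest (some p0) d1'

def state_diff (state1 : List (List Int)) (state2 : List (List Int)) : List (Option Int) :=
  state_diff_loop state1 state2 state1 none none

-- ===== PORT B =====
-- the exited branch: early-return scan for the first piece no longer present
-- ('piece[0]' on an empty piece would raise in Python; pyGet? is none exactly there, outside Pre_)
def state_diff_alt_exited (state2 : List (List Int)) : List (List Int) → List (Option Int)
  | [] => [none, none]
  | p :: rest =>
    if p ∈ state2 then state_diff_alt_exited state2 rest
    else [PySem.List.pyGet? p 0, none]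

-- one flat overwrite scan: 'x = piece[0]' for each piece of l not in other, starting from acc
def state_diff_alt_scan (other : List (List Int)) : List (List Int) → Option Int → Option Int
  | [], acc => acc
  | p :: rest, acc =>
    if p ∈ other then state_diff_alt_scan other rest acc
    else state_diff_alt_scan other rest (PySem.List.pyGet? p 0)

def state_diff_alt (state1 : List (List Int)) (state2 : List (List Int)) : List (Option Int) :=
  if state2.length < state1.length then state_diff_alt_exited state2 state1
  else
    match state_diff_alt_scan state2 state1 none with
    | none => [none, none]
    | some o => [some o, state_diff_alt_scan state1 state2 none]

-- ===== PRECONDITION & SPEC =====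
-- Pre_ excludes exactly the inputs on which A raises IndexError ('piece[0]' / 'new_piece[0]'
-- on an empty piece): the first missing piece empty when state2 is shorter than state1, or
-- any missing or added piece empty otherwise.
def Pre_state_diff (state1 : List (List Int)) (state2 : List (List Int)) : Prop :=
  state1.filter (fun p => ¬ p ∈ state2) = [] ∨
    (if state2.length < state1.length then
       (state1.filter (fun p => ¬ p ∈ state2)).headD [] ≠ []
     else
       ¬ [] ∈ state1.filter (fun p => ¬ p ∈ state2) ∧
       ¬ [] ∈ state2.filter (fun p => ¬ p ∈ state1))
instance (state1 : List (List Int)) (state2 : List (List Int)) : Decidable (Pre_state_diff state1 state2) := by unfold Pre_state_diff; infer_instance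

def pvWitness_state_diff : List (List Int) × List (List Int) := ([[1, 2], [3, 4]], [[5, 2], [3, 4]])

def Spec_state_diff (state1 : List (List Int)) (state2 : List (List Int)) (out : List (Option Int)) : Prop := out = state_diff_alt state1 state2
instance (state1 : List (List Int)) (state2 : List (List Int)) (out : List (Option Int)) : Decidable (Spec_state_diff state1 state2 out) := by unfold Spec_state_diff; infer_instance

-- ===== CLAIM (what is proved, stated in full; the proofs are below) =====
def Claim_equal_state_diff : Prop := ∀ (state1 : List (List Int)) (state2 : List (List Int)), Dom_state_diff state1 state2 → Pre_state_diff state1 state2 → Spec_state_diff state1 state2 (state_diff state1 state2)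

-- ===== LEMMAS AND PROOFS =====

theorem getLastD_irrel {α : Type} (l : List α) (h : l ≠ []) (d d' : α) :
    l.getLastD d = l.getLastD d' := by
  simp [List.getLastD_eq_getLast?, List.getLast?_eq_some_getLast h]

-- the inner loop returns (the head of) the last added piece, or d1 if no piece was added,
-- provided no added piece is empty
theorem state_diff_inner_eq (state1 : List (List Int)) (rest : List (List Int)) (d1 : Option Int)
    (h : ¬ [] ∈ rest.filter (fun p => ¬ p ∈ state1)) :
    state_diff_inner state1 rest d1 =
      some (if rest.filter (fun p => ¬ p ∈ state1) = [] then d1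
            else PySem.List.pyGet? ((rest.filter (fun p => ¬ p ∈ state1)).getLastD []) 0) := by
  induction rest generalizing d1 with
  | nil => simp [state_diff_inner]
  | cons np tl ih =>
    by_cases hm : np ∈ state1
    · have hfil : (np :: tl).filter (fun p => ¬ p ∈ state1) =
        tl.filter (fun p => ¬ p ∈ state1) := by simp [hm]
      rw [hfil] at h ⊢
      simp only [state_diff_inner, if_pos hm]
      exact ih d1 h
    · have hfil : (np :: tl).filter (fun p => ¬ p ∈ state1) =
        np :: tl.filter (fun p => ¬ p ∈ state1) := by simp [hm]
      rw [hfil] at h ⊢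
      have hne : np ≠ [] := fun hnil => h (by rw [hnil]; exact List.mem_cons_self ..)
      obtain ⟨x, xs, rfl⟩ := List.exists_cons_of_ne_nil hne
      simp only [state_diff_inner, if_neg hm, PySem.List.pyGet?_zero_cons]
      rw [ih (some x) (fun hc => h (List.mem_cons_of_mem _ hc))]
      by_cases htl : tl.filter (fun p => ¬ p ∈ state1) = []
      · rw [if_pos htl, if_neg (List.cons_ne_nil _ _), htl, List.getLastD_cons, List.getLastD_nil, PySem.List.pyGet?_zero_cons]
      · rw [if_neg htl, if_neg (List.cons_ne_nil _ _), List.getLastD_cons,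
          getLastD_irrel _ htl (x :: xs) []]

-- the outer loop over a suffix 'rest': A's diff equals the filter-based read-off values
theorem state_diff_loop_eq (state1 state2 : List (List Int)) (rest : List (List Int))
    (d0 d1 : Option Int)
    (hpre : rest.filter (fun p => ¬ p ∈ state2) = [] ∨
      (if state2.length < state1.length then
         (rest.filter (fun p => ¬ p ∈ state2)).headD [] ≠ []
       else
         ¬ [] ∈ rest.filter (fun p => ¬ p ∈ state2) ∧
         ¬ [] ∈ state2.filter (fun p => ¬ p ∈ state1))) :
    state_diff_loop state1 state2 rest d0 d1 =
      if rest.filter (fun p => ¬ p ∈ state2) = [] then [d0, d1]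
      else if state2.length < state1.length then
        [PySem.List.pyGet? ((rest.filter (fun p => ¬ p ∈ state2)).headD []) 0, d1]
      else
        [PySem.List.pyGet? ((rest.filter (fun p => ¬ p ∈ state2)).getLastD []) 0,
         if state2.filter (fun p => ¬ p ∈ state1) = [] then d1
         else PySem.List.pyGet? ((state2.filter (fun p => ¬ p ∈ state1)).getLastD []) 0] := by
  induction rest generalizing d0 d1 with
  | nil => simp [state_diff_loop]
  | cons piece tl ih =>
    by_cases hmem : piece ∈ state2
    · have hfil : (piece :: tl).filter (fun p => ¬ p ∈ state2) =
        tl.filter (fun p => ¬ p ∈ state2) := by simp [hmem]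
      rw [hfil] at hpre ⊢
      simp only [state_diff_loop, if_pos hmem]
      exact ih d0 d1 hpre
    · have hfil : (piece :: tl).filter (fun p => ¬ p ∈ state2) =
        piece :: tl.filter (fun p => ¬ p ∈ state2) := by simp [hmem]
      rw [hfil] at hpre ⊢
      have hpre' := hpre.resolve_left (List.cons_ne_nil _ _)
      by_cases hlen : state2.length < state1.length
      · -- a piece exited: A returns at the FIRST missing piece
        rw [if_pos hlen] at hpre'
        simp only [List.headD_cons] at hpre'
        obtain ⟨x, xs, rfl⟩ := List.exists_cons_of_ne_nil hpre'
        simp only [state_diff_loop, if_neg hmem, PySem.List.pyGet?_zero_cons, if_pos hlen,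
          if_neg (List.cons_ne_nil _ _), List.headD_cons]
      · rw [if_neg hlen] at hpre'
        have hpne : piece ≠ [] := fun hc => hpre'.1 (by rw [hc]; exact List.mem_cons_self ..)
        obtain ⟨x, xs, rfl⟩ := List.exists_cons_of_ne_nil hpne
        simp only [state_diff_loop, if_neg hmem, PySem.List.pyGet?_zero_cons, if_neg hlen]
        rw [state_diff_inner_eq state1 state2 d1 hpre'.2]
        refine Eq.trans (ih (some x) _ ?_) ?_
        · by_cases htl : tl.filter (fun p => ¬ p ∈ state2) = []
          · exact Or.inl htl
          · refine Or.inr ?_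
            rw [if_neg hlen]
            exact ⟨fun hc => hpre'.1 (List.mem_cons_of_mem _ hc), hpre'.2⟩
        · by_cases haf : state2.filter (fun p => ¬ p ∈ state1) = [] <;>
            [simp only [if_pos haf]; simp only [if_neg haf]] <;>
          · by_cases htl : tl.filter (fun p => ¬ p ∈ state2) = []
            · rw [if_pos htl, if_neg (List.cons_ne_nil _ _), htl, List.getLastD_cons, List.getLastD_nil, PySem.List.pyGet?_zero_cons]
            · rw [if_neg htl, if_neg hlen, if_neg (List.cons_ne_nil _ _), List.getLastD_cons,
                getLastD_irrel _ htl (x :: xs) []]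

-- B's exited scan returns the head of the first missing piece (or [none, none])
theorem state_diff_alt_exited_eq (state2 : List (List Int)) (l : List (List Int)) :
    state_diff_alt_exited state2 l =
      if l.filter (fun p => ¬ p ∈ state2) = [] then [(none : Option Int), none]
      else [PySem.List.pyGet? ((l.filter (fun p => ¬ p ∈ state2)).headD []) 0, none] := by
  induction l with
  | nil => simp [state_diff_alt_exited]
  | cons p tl ih =>
    by_cases hm : p ∈ state2
    · have hfil : (p :: tl).filter (fun q => ¬ q ∈ state2) =
        tl.filter (fun q => ¬ q ∈ state2) := by simp [hm]
      rw [hfil]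
      simp only [state_diff_alt_exited, if_pos hm]
      exact ih
    · have hfil : (p :: tl).filter (fun q => ¬ q ∈ state2) =
        p :: tl.filter (fun q => ¬ q ∈ state2) := by simp [hm]
      rw [hfil]
      simp [state_diff_alt_exited, hm]

-- B's overwrite scan returns the head of the last piece of l missing from other, else acc
theorem state_diff_alt_scan_eq (other : List (List Int)) (l : List (List Int)) (acc : Option Int) :
    state_diff_alt_scan other l acc =
      if l.filter (fun p => ¬ p ∈ other) = [] then acc
      else PySem.List.pyGet? ((l.filter (fun p => ¬ p ∈ other)).getLastD []) 0 := by
  induction l generalizing acc with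
  | nil => simp [state_diff_alt_scan]
  | cons p tl ih =>
    by_cases hm : p ∈ other
    · have hfil : (p :: tl).filter (fun q => ¬ q ∈ other) =
        tl.filter (fun q => ¬ q ∈ other) := by simp [hm]
      rw [hfil]
      simp only [state_diff_alt_scan, if_pos hm]
      exact ih acc
    · have hfil : (p :: tl).filter (fun q => ¬ q ∈ other) =
        p :: tl.filter (fun q => ¬ q ∈ other) := by simp [hm]
      rw [hfil]
      simp only [state_diff_alt_scan, if_neg hm]
      rw [ih (PySem.List.pyGet? p 0)]
      by_cases htl : tl.filter (fun q => ¬ q ∈ other) = []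
      · rw [if_pos htl, if_neg (List.cons_ne_nil _ _), htl, List.getLastD_cons, List.getLastD_nil]
      · rw [if_neg htl, if_neg (List.cons_ne_nil _ _), List.getLastD_cons,
          getLastD_irrel _ htl p []]

-- ===== VERDICT (by name: the statement is the Claim_ definition above) =====
theorem state_diff_spec : Claim_equal_state_diff := by
  intro state1 state2 _hdom hpre
  unfold Spec_state_diff state_diff state_diff_alt
  rw [state_diff_loop_eq state1 state2 state1 none none hpre,
    state_diff_alt_exited_eq, state_diff_alt_scan_eq, state_diff_alt_scan_eq]
  by_cases hlen : state2.length < state1.length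
  · rw [if_pos hlen, if_pos hlen]
  · rw [if_neg hlen, if_neg hlen]
    by_cases hmis : state1.filter (fun p => ¬ p ∈ state2) = []
    · rw [if_pos hmis, if_pos hmis]
    · rw [if_neg hmis, if_neg hmis]
      rcases hpre with hpre | hpre
      · exact absurd hpre hmis
      · rw [if_neg hlen] at hpre
        -- the last missing piece is nonempty, so its head is 'some'
        have hlast_mem : (state1.filter (fun p => ¬ p ∈ state2)).getLastD [] ∈
            state1.filter (fun p => ¬ p ∈ state2) := by
          rw [List.getLastD_eq_getLast?, List.getLast?_eq_some_getLast hmis]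
          exact List.getLast_mem hmis
        have hlast_ne : (state1.filter (fun p => ¬ p ∈ state2)).getLastD [] ≠ [] :=
          fun hc => hpre.1 (hc ▸ hlast_mem)
        obtain ⟨x, xs, hx⟩ := List.exists_cons_of_ne_nil hlast_ne
        rw [hx, PySem.List.pyGet?_zero_cons]
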